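-- pv_equiv track=rewrite | github.com/NVIDIA/NeMo | generate_eval_audios.py | get_all_replacements
-- ===== SOURCE A (Python) =====
-- def get_all_replacements(text):
--     # assumes text is in correct format
--     clean_str = ''
--     replacements = []
--     for ch in text:
--         if ch == '[':
--             new_replacement = clean_str + ch
--             replacements = [new_replacement] + replacements
--         elif ch == ']':
--             # add it to the most recent replacement
--             replacements[0] += ch
--         else:
--             clean_str += ch
--             for i in range(len(replacements)):
--                 replacements[i] += ch
--
--     return replacements
-- ===== SOURCE B (Python) =====
-- def get_all_replacements(text):
--     # Two-phase: compute each ']'s owning '[' (most recent '[' before it),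
--     # then build each bracket's replacement by one scan of the text.
--     n = len(text)
--     owner = [-1] * n
--     brackets = []
--     last = -1
--     for i, ch in enumerate(text):
--         if ch == '[':
--             brackets.append(i)
--             last = i
--         elif ch == ']':
--             owner[i] = last
--     out = []
--     for b in reversed(brackets):
--         chars = []
--         for i, ch in enumerate(text):
--             if ch == '[':
--                 if i == b:
--                     chars.append(ch)
--             elif ch == ']':
--                 if owner[i] == b:
--                     chars.append(ch)
--             else:
--                 chars.append(ch)
--         out.append(''.join(chars))
--     return out
-- ===== Notes on version B (the rewrite author's own statement) =====
-- stated objective: faster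
-- what changed: Instead of threading a growing list of partial replacement strings through one stateful scan (prepending a new entry at each opening bracket, appending every clean char to every open replacement), B first computes in one pass the owning opening-bracket index of every closing bracket plus the list of opening-bracket positions, then builds each replacement independently with a char-list and one join per bracket.
-- outside the precondition, e.g. on get_all_replacements(']'): A raises IndexError, B returns []
import Mathlib
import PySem

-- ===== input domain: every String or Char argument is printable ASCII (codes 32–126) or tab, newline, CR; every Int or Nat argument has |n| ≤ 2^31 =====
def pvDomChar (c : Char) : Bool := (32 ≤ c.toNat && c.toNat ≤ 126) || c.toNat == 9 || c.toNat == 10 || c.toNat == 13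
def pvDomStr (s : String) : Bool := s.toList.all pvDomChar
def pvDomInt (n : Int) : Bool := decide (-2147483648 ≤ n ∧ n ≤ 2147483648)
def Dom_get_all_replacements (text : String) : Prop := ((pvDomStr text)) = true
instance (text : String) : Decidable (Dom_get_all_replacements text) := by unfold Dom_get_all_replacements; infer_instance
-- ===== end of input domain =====

-- B restructures A (one stateful scan over a list of partial strings) into: one scan
-- computing each ']'s owning '[' plus the '[' positions, then an independent build per bracket.

-- ===== PORT A =====
-- A's loop state: (clean_str, replacements), strings as List Char.
-- replacements[0] += ch on an empty list raises IndexError in Python (excluded by Pre_);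
-- the [] branch of the match is unreachable under Pre_.
def gaLoopA : List Char → List Char → List (List Char) → List (List Char)
  | [], _, reps => reps
  | ch :: rest, clean, reps =>
    if ch = '[' then gaLoopA rest clean ((clean ++ [ch]) :: reps)
    else if ch = ']' then
      gaLoopA rest clean (match reps with
        | r :: t => (r ++ [ch]) :: t
        | [] => [])
    else gaLoopA rest (clean ++ [ch]) (reps.map (· ++ [ch]))

def get_all_replacements (text : String) : List String :=
  (gaLoopA text.toList [] []).map String.mk

-- ===== PORT B =====
-- first pass: for i, ch in enumerate(text) threading (last, owner, brackets);
-- owner is the array `owner` of Source B kept as an association list position ↦ owning '[' index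
-- (positions are distinct, default -1 for positions never assigned).
def gaScanB : List Char → Nat → Int → List (Nat × Int) → List Nat → Int × List (Nat × Int) × List Nat
  | [], _, last, own, brs => (last, own, brs)
  | ch :: rest, i, last, own, brs =>
    if ch = '[' then gaScanB rest (i + 1) (Int.ofNat i) own (brs ++ [i])
    else if ch = ']' then gaScanB rest (i + 1) last (own ++ [(i, last)]) brs
    else gaScanB rest (i + 1) last own brs

-- inner build loop of Source B for one bracket b: emit non-bracket chars, '[' at b, ']' owned by b
def gaBuildB (own : List (Nat × Int)) (b : Nat) : List Char → Nat → List Char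
  | [], _ => []
  | ch :: rest, i =>
    if ch = '[' then
      (if i = b then ch :: gaBuildB own b rest (i + 1) else gaBuildB own b rest (i + 1))
    else if ch = ']' then
      (if ((own.lookup i).getD (-1)) = (b : Int) then ch :: gaBuildB own b rest (i + 1)
       else gaBuildB own b rest (i + 1))
    else ch :: gaBuildB own b rest (i + 1)

def get_all_replacements_alt (text : String) : List String :=
  let tl := text.toList
  let s := gaScanB tl 0 (-1) [] []
  (s.2.2.reverse).map (fun b => String.mk (gaBuildB s.2.1 b tl 0))

-- ===== PRECONDITION & SPEC =====
-- Pre_ excludes exactly the texts on which A raises IndexError: a closing bracket before any opening bracket (cited in claim.json).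
def Pre_get_all_replacements (text : String) : Prop :=
  ∀ i ∈ List.range text.toList.length,
    text.toList.getD i ' ' = ']' → '[' ∈ text.toList.take i
instance (text : String) : Decidable (Pre_get_all_replacements text) := by
  unfold Pre_get_all_replacements; infer_instance

def pvWitness_get_all_replacements : String := "a[b]c"

def Spec_get_all_replacements (text : String) (out : List String) : Prop := out = get_all_replacements_alt text
instance (text : String) (out : List String) : Decidable (Spec_get_all_replacements text out) := by unfold Spec_get_all_replacements; infer_instance

-- ===== CLAIM (what is proved, stated in full; the proofs are below) =====
def Claim_equal_get_all_replacements : Prop := ∀ (text : String), Dom_get_all_replacements text → Pre_get_all_replacements text → Spec_get_all_replacements text (get_all_replacements text)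

-- ===== LEMMAS AND PROOFS =====

-- abbreviations for B's first-pass result on a prefix
def scanOf (l : List Char) : Int × List (Nat × Int) × List Nat := gaScanB l 0 (-1) [] []
def brsOf (l : List Char) : List Nat := (scanOf l).2.2
def ownOf (l : List Char) : List (Nat × Int) := (scanOf l).2.1
def lastOf (l : List Char) : Int := (scanOf l).1
def buildOf (l : List Char) (b : Nat) : List Char := gaBuildB (ownOf l) b l 0
def repsOf (l : List Char) : List (List Char) := (brsOf l).reverse.map (buildOf l)
def cleanOf (l : List Char) : List Char := l.filter (fun c => !(c = '[') && !(c = ']'))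
theorem scan_snoc (ch : Char) : ∀ (l : List Char) (i : Nat) (last : Int) (own : List (Nat × Int)) (brs : List Nat),
    gaScanB (l ++ [ch]) i last own brs =
      (if ch = '[' then
        (Int.ofNat (i + l.length), (gaScanB l i last own brs).2.1, (gaScanB l i last own brs).2.2 ++ [i + l.length])
       else if ch = ']' then
        ((gaScanB l i last own brs).1, (gaScanB l i last own brs).2.1 ++ [(i + l.length, (gaScanB l i last own brs).1)], (gaScanB l i last own brs).2.2)
       else gaScanB l i last own brs) := by
  intro l
  induction l with
  | nil => intro i last own brs; simp [gaScanB]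
  | cons c t ih =>
    intro i last own brs
    have harith : i + 1 + t.length = i + (t.length + 1) := by omega
    simp only [List.cons_append, gaScanB, List.length_cons]
    split_ifs with h1 h2 <;> rw [ih] <;> split_ifs <;> simp [harith]

theorem lookup_append_single_ne {own : List (Nat × Int)} {m k : Nat} {v : Int} (h : k ≠ m) :
    (own ++ [(m, v)]).lookup k = own.lookup k := by
  induction own with
  | nil => simp [List.lookup, beq_eq_false_iff_ne.mpr h]
  | cons p t ih =>
    cases p with
    | mk a b =>
      by_cases hk : k = a
      · simp [List.lookup, hk]
      · simp [List.lookup, beq_eq_false_iff_ne.mpr hk, ih]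

theorem lookup_append_single_self {own : List (Nat × Int)} {m : Nat} {v : Int}
    (h : ∀ p ∈ own, p.1 ≠ m) : (own ++ [(m, v)]).lookup m = some v := by
  induction own with
  | nil => simp
  | cons p t ih =>
    cases p with
    | mk a b =>
      have ha : a ≠ m := by simpa using h (a, b) (by simp)
      simp [List.lookup, beq_eq_false_iff_ne.mpr (Ne.symm ha),
        ih (fun q hq => h q (by simp [hq]))]

theorem getD_lookup_ne {own : List (Nat × Int)} {v : Int} (h : ∀ p ∈ own, p.2 ≠ v)
    (hv : v ≠ -1) (k : Nat) : (own.lookup k).getD (-1) ≠ v := by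
  induction own with
  | nil => simp [List.lookup, Ne.symm hv]
  | cons p t ih =>
    cases p with
    | mk a b =>
      by_cases hk : k = a
      · simpa [List.lookup, hk] using h (a, b) (by simp)
      · simp [List.lookup, beq_eq_false_iff_ne.mpr hk]
        exact ih (fun q hq => h q (by simp [hq]))

theorem build_snoc (own : List (Nat × Int)) (b : Nat) (ch : Char) : ∀ (l : List Char) (i : Nat),
    gaBuildB own b (l ++ [ch]) i =
      gaBuildB own b l i ++
        (if ch = '[' then (if i + l.length = b then [ch] else [])
         else if ch = ']' then (if ((own.lookup (i + l.length)).getD (-1)) = (b : Int) then [ch] else [])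
         else [ch]) := by
  intro l
  induction l with
  | nil => intro i; simp [gaBuildB]
  | cons c t ih =>
    intro i
    have harith : i + 1 + t.length = i + (t.length + 1) := by omega
    simp only [List.cons_append, gaBuildB, List.length_cons, ih, harith]
    split_ifs <;> simp

theorem build_own_extend {own : List (Nat × Int)} {m : Nat} {v : Int} (b : Nat) :
    ∀ (l : List Char) (i : Nat), i + l.length ≤ m →
    gaBuildB (own ++ [(m, v)]) b l i = gaBuildB own b l i := by
  intro l
  induction l with
  | nil => intro i _; simp [gaBuildB]
  | cons c t ih =>
    intro i hle
    simp only [List.length_cons] at hle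
    have hi : i ≠ m := by omega
    have ht : i + 1 + t.length ≤ m := by omega
    simp only [gaBuildB, lookup_append_single_ne hi]
    split_ifs <;> simp [ih _ ht]

theorem build_clean {own : List (Nat × Int)} {b : Nat} (h : ∀ p ∈ own, p.2 ≠ (b : Int)) :
    ∀ (l : List Char) (i : Nat), i + l.length ≤ b →
    gaBuildB own b l i = cleanOf l := by
  intro l
  induction l with
  | nil => intro i _; simp [gaBuildB, cleanOf]
  | cons c t ih =>
    intro i hle
    simp only [List.length_cons] at hle
    have hi : i ≠ b := by omega
    have ht : i + 1 + t.length ≤ b := by omega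
    have hlk : ((own.lookup i).getD (-1)) ≠ (b : Int) :=
      getD_lookup_ne h (by omega) i
    by_cases h1 : c = '['
    · simp [gaBuildB, cleanOf, h1, hi, ih _ ht]
    · by_cases h2 : c = ']'
      · simp [gaBuildB, cleanOf, h1, h2, hlk, ih _ ht]
      · simp [gaBuildB, cleanOf, h1, h2, ih _ ht]
theorem scan_snoc_open (l : List Char) (i : Nat) (last : Int) (own : List (Nat × Int)) (brs : List Nat) :
    gaScanB (l ++ ['[']) i last own brs =
      (Int.ofNat (i + l.length), (gaScanB l i last own brs).2.1, (gaScanB l i last own brs).2.2 ++ [i + l.length]) := by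
  rw [scan_snoc]; simp

theorem scan_snoc_close (l : List Char) (i : Nat) (last : Int) (own : List (Nat × Int)) (brs : List Nat) :
    gaScanB (l ++ [']']) i last own brs =
      ((gaScanB l i last own brs).1, (gaScanB l i last own brs).2.1 ++ [(i + l.length, (gaScanB l i last own brs).1)], (gaScanB l i last own brs).2.2) := by
  rw [scan_snoc]; simp

theorem scan_snoc_other {ch : Char} (hb : ¬ ch = '[') (hc : ¬ ch = ']') (l : List Char) (i : Nat) (last : Int) (own : List (Nat × Int)) (brs : List Nat) :
    gaScanB (l ++ [ch]) i last own brs = gaScanB l i last own brs := by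
  rw [scan_snoc]; simp [hb, hc]

theorem scan_inv : ∀ l : List Char,
    (∀ b ∈ brsOf l, b < l.length) ∧
    (∀ p ∈ ownOf l, p.1 < l.length ∧ p.2 < (l.length : Int)) ∧
    (brsOf l).Pairwise (· < ·) ∧
    lastOf l = ((brsOf l).getLast?.map Int.ofNat).getD (-1) ∧
    ('[' ∈ l ↔ brsOf l ≠ []) := by
  intro l
  induction l using List.reverseRecOn with
  | nil => simp [brsOf, ownOf, lastOf, scanOf, gaScanB]
  | append_singleton t ch ih =>
    obtain ⟨h1, h2, h3, h4, h5⟩ := ih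
    simp only [brsOf, ownOf, lastOf, scanOf] at *
    by_cases hb : ch = '['
    · subst hb
      rw [scan_snoc_open]
      simp only [Nat.zero_add, List.length_append, List.length_cons, List.length_nil]
      refine ⟨?_, ?_, ?_, ?_, ?_⟩
      · intro b hbm
        simp only [List.mem_append, List.mem_singleton] at hbm
        rcases hbm with hbm | hbm
        · have := h1 b hbm; omega
        · omega
      · intro p hp
        have := h2 p hp
        refine ⟨by omega, ?_⟩
        have : (p.2 : Int) < (t.length : Int) := this.2
        push_cast; omega
      · rw [List.pairwise_append]
        exact ⟨h3, List.pairwise_singleton _ _, fun a ha b hbm => by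
          simp only [List.mem_singleton] at hbm; subst hbm; exact h1 a ha⟩
      · rw [List.getLast?_concat]; rfl
      · simp
    · by_cases hc : ch = ']'
      · subst hc
        rw [scan_snoc_close]
        simp only [Nat.zero_add, List.length_append, List.length_cons, List.length_nil]
        refine ⟨?_, ?_, h3, h4, ?_⟩
        · intro b hbm; have := h1 b hbm; omega
        · intro p hp
          simp only [List.mem_append, List.mem_singleton] at hp
          rcases hp with hp | hp
          · have := h2 p hp
            have h22 : (p.2 : Int) < (t.length : Int) := this.2
            refine ⟨by omega, by push_cast; omega⟩
          · subst hp
            refine ⟨by simp, ?_⟩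
            rw [h4]
            cases hl : (gaScanB t 0 (-1) [] []).2.2.getLast? with
            | none => simp
            | some a =>
              have ham : a ∈ (gaScanB t 0 (-1) [] []).2.2 := List.mem_of_getLast? hl
              have := h1 a ham
              simp only [Option.map_some, Option.getD_some, Int.ofNat_eq_natCast]
              push_cast; omega
        · rw [← h5]; simp
      · rw [scan_snoc_other hb hc]
        simp only [List.length_append, List.length_cons, List.length_nil]
        refine ⟨?_, ?_, h3, h4, ?_⟩
        · intro b hbm; have := h1 b hbm; omega
        · intro p hp
          have := h2 p hp
          have h22 : (p.2 : Int) < (t.length : Int) := this.2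
          exact ⟨by omega, by push_cast; omega⟩
        · have hb' : ¬ '[' = ch := fun h => hb h.symm
          rw [← h5]; simp [hb']

theorem reps_snoc_clean {ch : Char} (h1 : ¬ ch = '[') (h2 : ¬ ch = ']') (l : List Char) :
    repsOf (l ++ [ch]) = (repsOf l).map (· ++ [ch]) := by
  simp only [repsOf, brsOf, buildOf, ownOf, scanOf]
  rw [scan_snoc_other h1 h2, List.map_map]
  apply List.map_congr_left
  intro b hb
  simp only [Function.comp, buildOf, ownOf, scanOf]
  rw [scan_snoc_other h1 h2, build_snoc]
  simp [h1, h2]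

theorem reps_snoc_open (l : List Char) :
    repsOf (l ++ ['[']) = (cleanOf l ++ ['[']) :: repsOf l := by
  obtain ⟨h1, h2, _, _, _⟩ := scan_inv l
  simp only [brsOf, ownOf, scanOf] at h1 h2
  simp only [repsOf, brsOf, buildOf, ownOf, scanOf]
  rw [scan_snoc_open]
  simp only [Nat.zero_add]
  rw [List.reverse_append, List.reverse_singleton, List.singleton_append, List.map_cons]
  congr 1
  · simp only [buildOf, ownOf, scanOf]
    rw [scan_snoc_open, build_snoc]
    simp only [Nat.zero_add, if_pos rfl, reduceIte]
    congr 1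
    exact build_clean (fun p hp => by have := (h2 p hp).2; omega) l 0 (by simp)
  · apply List.map_congr_left
    intro b hb
    simp only [buildOf, ownOf, scanOf]
    rw [scan_snoc_open, build_snoc]
    have hbm : b ∈ (gaScanB l 0 (-1) [] []).2.2 := List.mem_reverse.mp hb
    have := h1 b hbm
    simp only [Nat.zero_add, reduceIte]
    rw [if_neg (by omega)]
    simp

theorem reps_snoc_close {l : List Char} (h : '[' ∈ l) :
    ∃ r t, repsOf l = r :: t ∧ repsOf (l ++ [']']) = (r ++ [']']) :: t := by
  obtain ⟨h1, h2, h3, h4, h5⟩ := scan_inv l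
  simp only [brsOf, ownOf, lastOf, scanOf] at h1 h2 h3 h4 h5
  have hbne : (gaScanB l 0 (-1) [] []).2.2.reverse ≠ [] := by
    simpa using h5.mp h
  obtain ⟨b0, bs, hrev⟩ : ∃ b0 bs, (gaScanB l 0 (-1) [] []).2.2.reverse = b0 :: bs := by
    cases hr : (gaScanB l 0 (-1) [] []).2.2.reverse with
    | nil => exact absurd hr hbne
    | cons x xs => exact ⟨x, xs, rfl⟩
  have hlast : (gaScanB l 0 (-1) [] []).2.2.getLast? = some b0 := by
    rw [← List.head?_reverse, hrev]; rfl
  have hlastv : (gaScanB l 0 (-1) [] []).1 = Int.ofNat b0 := by rw [h4, hlast]; rfl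
  refine ⟨buildOf l b0, bs.map (buildOf l), ?_, ?_⟩
  · simp only [repsOf, brsOf, scanOf]; rw [hrev, List.map_cons]
  · simp only [repsOf, brsOf, buildOf, ownOf, scanOf]
    rw [scan_snoc_close]
    simp only [Nat.zero_add]
    rw [hrev, List.map_cons]
    have hlk : ((((gaScanB l 0 (-1) [] []).2.1 ++ [(l.length, (gaScanB l 0 (-1) [] []).1)]).lookup l.length).getD (-1)) = Int.ofNat b0 := by
      rw [lookup_append_single_self (fun p hp => by have := (h2 p hp).1; omega)]
      simpa using hlastv
    congr 1
    · simp only [buildOf, ownOf, scanOf]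
      rw [scan_snoc_close, build_snoc]
      simp only [Nat.zero_add, hlk]
      rw [build_own_extend _ l 0 (by simp)]
      simp
    · apply List.map_congr_left
      intro b hb
      have hblt : b < b0 := by
        have hp : ((gaScanB l 0 (-1) [] []).2.2.reverse).Pairwise (fun a b => b < a) := by
          rw [List.pairwise_reverse]; exact h3
        rw [hrev] at hp
        exact (List.pairwise_cons.mp hp).1 b hb
      simp only [buildOf, ownOf, scanOf]
      rw [scan_snoc_close, build_snoc]
      simp only [Nat.zero_add, hlk]
      rw [build_own_extend _ l 0 (by simp)]
      have hne : Int.ofNat b0 ≠ (b : Int) := by simp; omega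
      simp [hne]
      omega
theorem clean_snoc_clean {ch : Char} (h1 : ¬ ch = '[') (h2 : ¬ ch = ']') (l : List Char) :
    cleanOf (l ++ [ch]) = cleanOf l ++ [ch] := by
  simp [cleanOf, h1, h2]

theorem clean_snoc_bracket {ch : Char} (h : ch = '[' ∨ ch = ']') (l : List Char) :
    cleanOf (l ++ [ch]) = cleanOf l := by
  rcases h with h | h <;> simp [cleanOf, h]

theorem main_invariant : ∀ (rest l : List Char),
    (∀ i ∈ List.range (l ++ rest).length, (l ++ rest).getD i ' ' = ']' → '[' ∈ (l ++ rest).take i) →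
    gaLoopA rest (cleanOf l) (repsOf l) = repsOf (l ++ rest) := by
  intro rest
  induction rest with
  | nil => intro l _; simp [gaLoopA]
  | cons ch rest ih =>
    intro l hp
    have hassoc : l ++ ch :: rest = (l ++ [ch]) ++ rest := by simp
    by_cases hb : ch = '['
    · subst hb
      simp only [gaLoopA, if_pos rfl]
      rw [hassoc]
      have := ih (l ++ ['[']) (by rw [← hassoc]; exact hp)
      rw [clean_snoc_bracket (Or.inl rfl), reps_snoc_open] at this
      exact this
    · by_cases hc : ch = ']'
      · subst hc
        simp only [gaLoopA, if_neg hb, if_pos rfl]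
        have hm : '[' ∈ l := by
          have hlen : l.length ∈ List.range (l ++ ']' :: rest).length := by
            simp [List.mem_range]
          have hget : (l ++ ']' :: rest).getD l.length ' ' = ']' := by
            rw [List.getD_append_right _ _ _ _ (Nat.le_refl _)]
            simp
          have := hp l.length hlen hget
          rwa [List.take_left] at this
        obtain ⟨r, t, hr, hr2⟩ := reps_snoc_close hm
        rw [hr]
        simp only
        rw [hassoc]
        have := ih (l ++ [']']) (by rw [← hassoc]; exact hp)
        rw [clean_snoc_bracket (Or.inr rfl), hr2] at this
        exact this
      · simp only [gaLoopA, if_neg hb, if_neg hc]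
        rw [hassoc]
        have := ih (l ++ [ch]) (by rw [← hassoc]; exact hp)
        rw [clean_snoc_clean hb hc, reps_snoc_clean hb hc] at this
        exact this

-- ===== VERDICT (by name: the statement is the Claim_ definition above) =====
theorem get_all_replacements_spec : Claim_equal_get_all_replacements := by
  intro text _ hpre
  unfold Pre_get_all_replacements at hpre
  unfold Spec_get_all_replacements get_all_replacements get_all_replacements_alt
  have h := main_invariant text.toList [] (by simpa using hpre)
  have hclean : cleanOf [] = [] := rfl
  have hreps : repsOf ([] : List Char) = [] := rfl
  rw [hclean, hreps, List.nil_append] at h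
  rw [h]
  simp only [repsOf, brsOf, buildOf, ownOf, scanOf, List.map_map]
  rfl
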